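-- pv_equiv track=rewrite | github.com/o0H-M0o/MindCare---Depression-Detection | frontend/utils/depression_detection.py | _has_streak
-- ===== SOURCE A (Python) =====
-- from typing import Dict, List, Optional
--
-- def _has_streak(values: List[bool], min_len: int) -> bool:
-- 	"""Return True if there exists a consecutive streak of True values of length >= min_len."""
-- 	if not values:
-- 		return False
-- 	run = 0
-- 	for v in values:
-- 		run = run + 1 if v else 0
-- 		if run >= min_len:
-- 			return True
-- 	return False
-- ===== SOURCE B (Python) =====
-- def _has_streak(values, min_len):
-- 	"""Return True if there exists a consecutive streak of True values of length >= min_len."""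
-- 	if not values:
-- 		return False
-- 	if min_len <= 0:
-- 		return True
-- 	i, n = 0, len(values)
-- 	while i < n:
-- 		if values[i]:
-- 			j = i
-- 			while j < n and values[j]:
-- 				j += 1
-- 			if j - i >= min_len:
-- 				return True
-- 			i = j
-- 		else:
-- 			i += 1
-- 	return False
-- ===== Notes on version B (the rewrite author's own statement) =====
-- stated objective: alternative
-- what changed: Replaces the running-counter scan with a block scan: after trivial guards (empty list, non-positive length), it jumps from one maximal run of True values to the next and compares each run's length against min_len, instead of maintaining and resetting a counter at every element.
import Mathlib
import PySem

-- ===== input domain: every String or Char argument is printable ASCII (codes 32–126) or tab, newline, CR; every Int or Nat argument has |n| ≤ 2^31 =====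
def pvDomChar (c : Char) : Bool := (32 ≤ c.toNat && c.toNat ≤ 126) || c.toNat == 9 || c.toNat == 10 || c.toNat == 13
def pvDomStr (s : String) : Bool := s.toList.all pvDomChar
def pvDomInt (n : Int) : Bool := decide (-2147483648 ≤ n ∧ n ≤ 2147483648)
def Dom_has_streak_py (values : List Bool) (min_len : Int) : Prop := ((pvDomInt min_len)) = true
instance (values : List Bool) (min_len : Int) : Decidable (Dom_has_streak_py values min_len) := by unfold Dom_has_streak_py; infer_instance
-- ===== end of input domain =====

-- B replaces A's running counter with a scan that jumps from one maximal True-run to the next (alternative decomposition, same O(n)).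

-- ===== PORT A =====
-- A's for-loop with early return; the run counter is the carried state
def hasStreakGo (min_len : Int) : List Bool → Int → Bool
  | [], _ => false
  | v :: rest, run =>
    let run' := if v then run + 1 else 0
    if run' ≥ min_len then true else hasStreakGo min_len rest run'

def has_streak_py (values : List Bool) (min_len : Int) : Bool :=
  if values = [] then false else hasStreakGo min_len values 0

-- ===== PORT B =====
-- Source B's outer while loop over list suffixes: skip a False, or measure the whole True-run;
-- the inner counting while loop is takeWhile over the suffix, `i = j` is dropping that run
def hasStreakScan (min_len : Int) : List Bool → Bool
  | [] => false
  | false :: rest => hasStreakScan min_len rest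
  | true :: rest =>
    let g := rest.takeWhile (fun b => b)
    if (1 + (g.length : Int)) ≥ min_len then true
    else hasStreakScan min_len (rest.drop g.length)
termination_by l => l.length
decreasing_by
  all_goals simp

def has_streak_py_alt (values : List Bool) (min_len : Int) : Bool :=
  if values = [] then false
  else if min_len ≤ 0 then true
  else hasStreakScan min_len values

-- ===== PRECONDITION & SPEC =====
def Spec_has_streak_py (values : List Bool) (min_len : Int) (out : Bool) : Prop := out = has_streak_py_alt values min_len
instance (values : List Bool) (min_len : Int) (out : Bool) : Decidable (Spec_has_streak_py values min_len out) := by unfold Spec_has_streak_py; infer_instance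

-- ===== CLAIM (what is proved, stated in full; the proofs are below) =====
def Claim_equal_has_streak_py : Prop := ∀ (values : List Bool) (min_len : Int), Dom_has_streak_py values min_len → Spec_has_streak_py values min_len (has_streak_py values min_len)

-- ===== LEMMAS AND PROOFS =====

theorem dropWhile_eq_drop_len (p : Bool → Bool) (l : List Bool) :
    l.dropWhile p = l.drop (l.takeWhile p).length := by
  induction l with
  | nil => rfl
  | cons a l ih =>
    by_cases h : p a = true
    · simp [List.dropWhile, List.takeWhile, h, ih]
    · simp [List.dropWhile, List.takeWhile, h]

-- A's loop, entered with run < min_len, succeeds iff the run through the leading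
-- True block reaches min_len, or the loop restarted after that block succeeds.
theorem hasStreakGo_char (m : Int) (l : List Bool) (run : Int) (h : run < m) :
    hasStreakGo m l run =
      ((decide (run + (((l.takeWhile (fun b => b)).length : Int)) ≥ m)) ||
        hasStreakGo m (l.dropWhile (fun b => b)) 0) := by
  induction l generalizing run with
  | nil =>
    simp only [hasStreakGo, List.takeWhile_nil, List.dropWhile_nil, List.length_nil,
      Int.natCast_zero, add_zero, Bool.false_eq, Bool.or_eq_false_iff, decide_eq_false_iff_not]
    exact ⟨by omega, trivial⟩
  | cons v rest ih =>
    cases v with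
    | false =>
      simp only [hasStreakGo, List.takeWhile_cons, List.dropWhile_cons]
      norm_num
      have h1 : decide (m ≤ run) = false := by simp; omega
      rw [h1]
      simp only [Bool.false_or]
      by_cases h2 : m ≤ (0 : Int)
      · simp [hasStreakGo, ge_iff_le, h2]
      · simp [hasStreakGo, ge_iff_le, h2]
    | true =>
      simp only [hasStreakGo, List.takeWhile_cons, List.dropWhile_cons]
      norm_num
      by_cases hge : m ≤ run + 1
      · have h2 : m ≤ run + (((rest.takeWhile (fun b => b)).length : Int) + 1) := by omega
        simp [hge, h2]
      · rw [ih (run + 1) (by omega)]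
        have h1 : decide (m ≤ run + 1) = false := by simp; omega
        rw [h1, Bool.false_or,
          decide_eq_decide.mpr (show (run + 1 + ((rest.takeWhile (fun b => b)).length : Int) ≥ m)
            ↔ (m ≤ run + (((rest.takeWhile (fun b => b)).length : Int) + 1)) by omega)]

theorem scan_eq_go (m : Int) (hm : 0 < m) (l : List Bool) :
    hasStreakScan m l = hasStreakGo m l 0 := by
  induction hl : l.length using Nat.strong_induction_on generalizing l with
  | _ n ih =>
  subst hl
  cases l with
  | nil => simp [hasStreakScan, hasStreakGo]
  | cons v rest =>
    cases v with
    | false =>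
      simp only [hasStreakScan]
      rw [ih rest.length (by simp) rest rfl]
      simp only [hasStreakGo]
      rw [if_neg (by simp; omega)]
      norm_num
    | true =>
      rw [hasStreakGo_char m (true :: rest) 0 hm]
      simp only [hasStreakScan, List.takeWhile_cons, List.dropWhile_cons]
      norm_num
      rw [← dropWhile_eq_drop_len]
      by_cases hge : m ≤ 1 + ((rest.takeWhile (fun b => b)).length : Int)
      · have e1 : decide (m ≤ 1 + ((rest.takeWhile (fun b => b)).length : Int)) = true := by
          simp; omega
        have e2 : decide (m ≤ ((rest.takeWhile (fun b => b)).length : Int) + 1) = true := by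
          simp; omega
        rw [e1, e2, Bool.true_or, Bool.true_or]
      · have e1 : decide (m ≤ 1 + ((rest.takeWhile (fun b => b)).length : Int)) = false := by
          simp; omega
        have e2 : decide (m ≤ ((rest.takeWhile (fun b => b)).length : Int) + 1) = false := by
          simp; omega
        rw [e1, e2, Bool.false_or, Bool.false_or]
        have hlen : (rest.dropWhile (fun b => b)).length < (true :: rest).length := by
          have := (List.dropWhile_sublist (l := rest) (fun b => b)).length_le
          simp; omega
        exact ih _ hlen _ rfl

-- ===== VERDICT (by name: the statement is the Claim_ definition above) =====
theorem has_streak_py_spec : Claim_equal_has_streak_py := by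
  intro values min_len _
  unfold Spec_has_streak_py has_streak_py has_streak_py_alt
  cases values with
  | nil => simp
  | cons v rest =>
    rw [if_neg (by simp), if_neg (by simp)]
    by_cases hm : min_len ≤ 0
    · rw [if_pos hm]
      simp only [hasStreakGo]
      rw [if_pos (by cases v <;> simp <;> omega)]
    · rw [if_neg hm]
      exact (scan_eq_go min_len (by omega) (v :: rest)).symm
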